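-- pv_equiv track=rewrite | github.com/JustAnAverageGuy/ideal-enigma | practice/archives/oct_7/B_Two_Buttons.py | solve
-- ===== SOURCE A (Python) =====
-- def solve(n,m):
--     if m <= n: return n - m
--     k = 0
--     t = n
--     while t < m:
--         t <<= 1
--         k += 1
--     if t == m: return k
--     ans = k
--     d = t - m
--     for i in range(k,-1,-1):
--         f = d // (1 << i)
--         ans += f
--         d %= (1<<i)
--     return ans
-- ===== SOURCE B (Python) =====
-- def solve(n, m):
--     if m <= n:
--         return n - m
--     if m % 2 == 0:
--         return 1 + solve(n, m // 2)
--     return 1 + solve(n, m + 1)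
-- ===== Notes on version B (the rewrite author's own statement) =====
-- stated objective: simpler
-- what changed: B replaces A's forward doubling loop plus power-of-two digit-extraction pass by the standard backward greedy recursion on m (halve when even, increment when odd, count steps), eliminating the second loop entirely.
import Mathlib
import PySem

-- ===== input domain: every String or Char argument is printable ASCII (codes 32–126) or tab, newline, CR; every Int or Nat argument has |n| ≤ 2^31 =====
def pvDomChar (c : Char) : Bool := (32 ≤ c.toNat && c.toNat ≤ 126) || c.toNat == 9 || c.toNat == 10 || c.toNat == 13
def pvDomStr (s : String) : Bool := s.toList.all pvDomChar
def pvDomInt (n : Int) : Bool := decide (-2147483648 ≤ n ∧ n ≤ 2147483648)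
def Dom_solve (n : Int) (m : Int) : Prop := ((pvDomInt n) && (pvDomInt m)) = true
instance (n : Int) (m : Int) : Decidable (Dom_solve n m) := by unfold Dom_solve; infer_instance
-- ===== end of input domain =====

-- B replaces A's forward doubling loop plus digit-extraction pass by the standard backward
-- greedy recursion on m; objective: simpler.

-- ===== PORT A =====
-- while t < m: t <<= 1; k += 1   ('t <<= 1' is exactly 't * 2').  The '0 < t' test is only a
-- totality guard: the Python loop never terminates there (those inputs are outside Pre_solve).
-- termination measure fact for the doubling loop (cited by name in decreasing_by)
theorem solveLoop_dec (m t : Int) (h1 : t < m) (h2 : 0 < t) :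
    (m - t * 2).toNat < (m - t).toNat := by omega

def solveLoop (m t k : Int) : Int × Int :=
  if t < m then
    if 0 < t then solveLoop m (t * 2) (k + 1)
    else (t, k)
  else (t, k)
termination_by (m - t).toNat
decreasing_by exact solveLoop_dec m t ‹_› ‹_›

def solve (n : Int) (m : Int) : Int :=
  if m ≤ n then n - m
  else
    let tk := solveLoop m n 0
    if tk.1 = m then tk.2
    else
      -- for i in range(k,-1,-1): f = d // (1 << i); ans += f; d %= (1 << i)
      -- every i drawn from this range is ≥ 0, so '2 ^ i.toNat' renders Python's '1 << i' exactly
      ((PySem.List.pyRange tk.2 (-1) (-1)).foldl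
        (fun (s : Int × Int) i =>
          (s.1 + PySem.Int.floordiv s.2 (2 ^ i.toNat),
           PySem.Int.mod s.2 (2 ^ i.toNat)))
        (tk.2, tk.1 - m)).1

-- ===== PORT B =====
-- termination measure facts for B's recursion (cited by name in decreasing_by;
-- proved by hand to keep the proof terms small)
theorem solve_alt_dec_even (n m : Int) (h : ¬ m ≤ n) (h0 : ¬ n ≤ 0)
    (he : PySem.Int.mod m 2 = 0) :
    (if PySem.Int.floordiv m 2 ≤ n then 0
     else 2 * PySem.Int.floordiv m 2 + 3 * PySem.Int.mod (PySem.Int.floordiv m 2) 2).toNat <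
    (if m ≤ n then 0 else 2 * m + 3 * PySem.Int.mod m 2).toNat := by
  rw [PySem.Int.mod_eq_emod_of_pos (by norm_num : (0:Int) < 2)] at he
  rw [PySem.Int.mod_eq_emod_of_pos (by norm_num : (0:Int) < 2),
      PySem.Int.mod_eq_emod_of_pos (by norm_num : (0:Int) < 2),
      PySem.Int.floordiv_eq_ediv_of_pos (by norm_num : (0:Int) < 2)]
  have hq : 2 * (m / 2) = m := by
    have := Int.mul_ediv_add_emod m 2
    rw [he] at this; linarith
  rw [if_neg h, he]
  by_cases hc : m / 2 ≤ n
  · rw [if_pos hc]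
    rw [show ((0:Int).toNat) = 0 from rfl]
    rw [Int.lt_toNat]
    rw [show ((0:Nat):Int) = 0 from rfl]
    linarith
  · rw [if_neg hc]
    have hr0 : 0 ≤ m / 2 % 2 := Int.emod_nonneg _ (by norm_num)
    have hr1 : m / 2 % 2 < 2 := Int.emod_lt_of_pos _ (by norm_num)
    have hr1' : m / 2 % 2 ≤ 1 := by linarith [Int.lt_iff_add_one_le.mp hr1]
    have hq2 : n + 1 ≤ m / 2 := Int.lt_iff_add_one_le.mp (lt_of_not_ge hc)
    have hn1 : 1 ≤ n := Int.lt_iff_add_one_le.mp (lt_of_not_ge h0)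
    rw [Int.toNat_lt_toNat (by linarith)]
    linarith

theorem solve_alt_dec_odd (n m : Int) (h : ¬ m ≤ n) (h0 : ¬ n ≤ 0)
    (he : ¬ PySem.Int.mod m 2 = 0) :
    (if m + 1 ≤ n then 0 else 2 * (m + 1) + 3 * PySem.Int.mod (m + 1) 2).toNat <
    (if m ≤ n then 0 else 2 * m + 3 * PySem.Int.mod m 2).toNat := by
  rw [PySem.Int.mod_eq_emod_of_pos (by norm_num : (0:Int) < 2)] at he
  rw [PySem.Int.mod_eq_emod_of_pos (by norm_num : (0:Int) < 2),
      PySem.Int.mod_eq_emod_of_pos (by norm_num : (0:Int) < 2)]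
  have hm2 : m % 2 = 1 := (Int.emod_two_eq m).resolve_left he
  have e0 : (m + 1) % 2 = 0 := by rw [Int.add_emod, hm2]; rfl
  rw [if_neg h, if_neg (fun h2 => h (le_trans (by linarith) h2)), e0, hm2]
  rw [show 2 * (m + 1) + 3 * 0 = 2 * m + 2 by ring]
  rw [Int.toNat_lt_toNat (by linarith)]
  linarith

-- the 'n ≤ 0' test is only a totality guard: Python B recurses forever there (outside Pre_solve)
def solve_alt (n : Int) (m : Int) : Int :=
  if m ≤ n then n - m
  else if n ≤ 0 then 0
  else if PySem.Int.mod m 2 = 0 then 1 + solve_alt n (PySem.Int.floordiv m 2)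
  else 1 + solve_alt n (m + 1)
termination_by (if m ≤ n then 0 else 2 * m + 3 * PySem.Int.mod m 2).toNat
decreasing_by
  · exact solve_alt_dec_even n m ‹_› ‹_› ‹_›
  · exact solve_alt_dec_odd n m ‹_› ‹_› ‹_›

-- ===== PRECONDITION & SPEC =====
-- Pre_solve excludes exactly the inputs with n ≤ 0 < m - n (i.e. n ≤ 0 and m > n), on which
-- Python A's doubling loop never terminates; Python B diverges on exactly the same inputs.
def Pre_solve (n : Int) (m : Int) : Prop := m ≤ n ∨ 1 ≤ n
instance (n : Int) (m : Int) : Decidable (Pre_solve n m) := by unfold Pre_solve; infer_instance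
def pvWitness_solve : Int × Int := (3, 10)
def Spec_solve (n : Int) (m : Int) (out : Int) : Prop := out = solve_alt n m
instance (n : Int) (m : Int) (out : Int) : Decidable (Spec_solve n m out) := by unfold Spec_solve; infer_instance

-- ===== CLAIM (what is proved, stated in full; the proofs are below) =====
def Claim_equal_solve : Prop := ∀ (n : Int) (m : Int), Dom_solve n m → Pre_solve n m → Spec_solve n m (solve n m)

-- ===== LEMMAS AND PROOFS =====

-- k is threaded additively through the doubling loop
theorem solveLoop_add (m t k c : Int) :
    solveLoop m t (k + c) = ((solveLoop m t k).1, (solveLoop m t k).2 + c) := by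
  fun_induction solveLoop m t k with
  | case1 t k h h0 ih =>
    rw [solveLoop, if_pos h, if_pos h0, show k + c + 1 = k + 1 + c by ring, ih]
  | case2 t k h h0 => rw [solveLoop, if_pos h, if_neg h0]
  | case3 t k h => rw [solveLoop, if_neg h]

theorem solveLoop_even (m t k : Int) (h : t % 2 = 0) : (solveLoop m t k).1 % 2 = 0 := by
  fun_induction solveLoop m t k with
  | case1 t k h1 h0 ih => exact ih (by omega)
  | case2 t k h1 h0 => simpa using h
  | case3 t k h1 => simpa using h

theorem solveLoop_k_le (m t k : Int) : k ≤ (solveLoop m t k).2 := by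
  fun_induction solveLoop m t k with
  | case1 t k h1 h0 ih => omega
  | case2 t k h1 h0 => simp
  | case3 t k h1 => simp

-- doubling both the target and the running value commutes with the loop
theorem solveLoop_dbl (m t k : Int) (h : 0 < t) :
    solveLoop (2 * m) (2 * t) k = (2 * (solveLoop m t k).1, (solveLoop m t k).2) := by
  fun_induction solveLoop m t k with
  | case1 t k h1 h0 ih =>
    rw [solveLoop, if_pos (by omega : 2 * t < 2 * m), if_pos (by omega : (0:Int) < 2 * t),
        show 2 * t * 2 = 2 * (t * 2) by ring, ih (by omega)]
  | case2 t k h1 h0 => omega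
  | case3 t k h1 =>
    rw [solveLoop, if_neg (by omega : ¬ 2 * t < 2 * m)]

-- with an odd target and an even running value, the loop cannot distinguish m from m + 1
theorem solveLoop_oddm (m t k : Int) (hm : m % 2 = 1) (ht : t % 2 = 0) (h0 : 0 < t) :
    solveLoop m t k = solveLoop (m + 1) t k := by
  fun_induction solveLoop m t k with
  | case1 t k h1 h0' ih =>
    conv_rhs => rw [solveLoop]
    rw [if_pos (by omega : t < m + 1), if_pos h0']
    exact ih (by omega) (by omega)
  | case2 t k h1 h0' => omega
  | case3 t k h1 =>
    rw [solveLoop, if_neg (by omega : ¬ t < m + 1)]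

-- the value of A's digit-extraction pass: levels i, i-1, …, 0 applied greedily to d
def Ssum : Nat → Int → Int
  | 0, d => d
  | i + 1, d => d / 2 ^ (i + 1) + Ssum i (d % 2 ^ (i + 1))

theorem Ssum_zero (i : Nat) : Ssum i 0 = 0 := by
  induction i with
  | zero => rfl
  | succ i ih => simp [Ssum, ih]

theorem Ssum_even (i : Nat) (d : Int) : Ssum (i + 1) (2 * d) = Ssum i d := by
  induction i generalizing d with
  | zero =>
    simp [Ssum, Int.mul_ediv_cancel_left d (by norm_num : (2:Int) ≠ 0),
          Int.mul_emod_right]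
  | succ i ih =>
    have e1 : (2 * d) / 2 ^ (i + 2) = d / 2 ^ (i + 1) := by
      rw [show ((2:Int) ^ (i + 2)) = 2 * 2 ^ (i + 1) by ring]
      exact Int.mul_ediv_mul_of_pos _ _ (by norm_num)
    have e2 : (2 * d) % 2 ^ (i + 2) = 2 * (d % 2 ^ (i + 1)) := by
      rw [show ((2:Int) ^ (i + 2)) = 2 * 2 ^ (i + 1) by ring]
      exact Int.mul_emod_mul_of_pos _ _ (by norm_num)
    rw [show Ssum (i + 2) (2 * d) = (2 * d) / 2 ^ (i + 2) + Ssum (i + 1) ((2 * d) % 2 ^ (i + 2)) from rfl,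
        e1, e2, ih]
    rfl

theorem Ssum_succ_of_even (i : Nat) (d : Int) (hd : d % 2 = 0) :
    Ssum i (d + 1) = Ssum i d + 1 := by
  induction i generalizing d with
  | zero => rfl
  | succ i ih =>
    have hc : (0:Int) < 2 ^ (i + 1) := by positivity
    have hdvd : (2:Int) ∣ 2 ^ (i + 1) := dvd_pow_self 2 (Nat.succ_ne_zero i)
    have hr2 : d % 2 ^ (i + 1) % 2 = 0 := by
      rw [Int.emod_emod_of_dvd d hdvd]; exact hd
    have hrlt : d % 2 ^ (i + 1) < 2 ^ (i + 1) := Int.emod_lt_of_pos d hc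
    have hrnn : 0 ≤ d % 2 ^ (i + 1) := Int.emod_nonneg d (by positivity)
    have hc2 : (2:Int) ^ (i + 1) % 2 = 0 := Int.emod_eq_zero_of_dvd hdvd
    have key : (d + 1) / 2 ^ (i + 1) = d / 2 ^ (i + 1) ∧
               (d + 1) % 2 ^ (i + 1) = d % 2 ^ (i + 1) + 1 := by
      apply (Int.ediv_emod_unique hc).mpr
      have hdm := Int.emod_add_mul_ediv d (2 ^ (i + 1))
      constructor
      · omega
      · omega
    rw [show Ssum (i + 1) (d + 1) = (d + 1) / 2 ^ (i + 1) + Ssum i ((d + 1) % 2 ^ (i + 1)) from rfl,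
        key.1, key.2, ih _ hr2]
    rw [show Ssum (i + 1) d = d / 2 ^ (i + 1) + Ssum i (d % 2 ^ (i + 1)) from rfl]
    ring

-- A's for-loop over range(k, -1, -1) computes k + Ssum k d
theorem fold_Ssum (i : Nat) (a d : Int) :
    ((PySem.List.pyRange (i : Int) (-1) (-1)).foldl
      (fun (s : Int × Int) j =>
        (s.1 + PySem.Int.floordiv s.2 (2 ^ j.toNat),
         PySem.Int.mod s.2 (2 ^ j.toNat)))
      (a, d)).1 = a + Ssum i d := by
  induction i generalizing a d with
  | zero =>
    rw [PySem.List.pyRange_neg_one_cons (by norm_num)]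
    simp only [Nat.cast_zero]
    have hnil : PySem.List.pyRange ((0:Int) - 1) (-1) (-1) = [] :=
      PySem.List.pyRange_neg_one_eq_nil (by norm_num)
    rw [hnil]
    simp [PySem.Int.floordiv, PySem.Int.mod, Ssum]
  | succ i ih =>
    rw [PySem.List.pyRange_neg_one_cons (by exact_mod_cast by omega : (-1:Int) < (i + 1 : Nat))]
    rw [show ((i + 1 : Nat) : Int) - 1 = (i : Int) by push_cast; ring]
    rw [List.foldl_cons]
    rw [show ((i + 1 : Nat) : Int).toNat = i + 1 by omega]
    rw [PySem.Int.floordiv_eq_ediv_of_pos (by positivity : (0:Int) < 2 ^ (i + 1)),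
        PySem.Int.mod_eq_emod_of_pos (by positivity : (0:Int) < 2 ^ (i + 1))]
    rw [ih]
    rw [show Ssum (i + 1) d = d / 2 ^ (i + 1) + Ssum i (d % 2 ^ (i + 1)) from rfl]
    ring

-- closed description of A's value: loop result plus the digit-extraction pass
theorem solve_val (n m : Int) (_hn : 0 < n) :
    solve n m =
      if (solveLoop m n 0).1 = m then (solveLoop m n 0).2
      else (solveLoop m n 0).2 + Ssum (solveLoop m n 0).2.toNat ((solveLoop m n 0).1 - m) := by
  by_cases h : n < m
  · have hk : (0:Int) ≤ (solveLoop m n 0).2 := solveLoop_k_le m n 0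
    have hcast : ((solveLoop m n 0).2.toNat : Int) = (solveLoop m n 0).2 :=
      Int.toNat_of_nonneg hk
    rw [solve, if_neg (by omega)]
    by_cases ht : (solveLoop m n 0).1 = m
    · simp [ht]
    · rw [if_neg ht, if_neg ht]
      conv_lhs => rw [← hcast]
      rw [fold_Ssum, hcast]
  · have hstop : solveLoop m n 0 = (n, 0) := by rw [solveLoop, if_neg h]
    rw [solve, if_pos (by omega), hstop]
    by_cases heq : n = m
    · rw [if_pos heq]; omega
    · rw [if_neg heq, show ((0:Int).toNat) = 0 from rfl,
          show Ssum 0 (n - m) = n - m from rfl]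
      omega

-- the doubling loop for target m, started at n, in terms of the loop for target m / 2
theorem solveLoop_half (n m' : Int) (_hn : 1 ≤ n) (hm : n < 2 * m') :
    solveLoop (2 * m') n 0 = (2 * (solveLoop m' n 0).1, (solveLoop m' n 0).2 + 1) := by
  rw [solveLoop, if_pos hm, if_pos (by omega : (0:Int) < n)]
  rw [show n * 2 = 2 * n by ring, show (0:Int) + 1 = 1 from rfl]
  rw [solveLoop_dbl m' n 1 (by omega)]
  rw [show (1:Int) = 0 + 1 from rfl, solveLoop_add]
  norm_num

-- A satisfies the even-step recurrence of the backward greedy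
theorem solve_even (n m : Int) (hn : 1 ≤ n) (hm : n < m) (he : m % 2 = 0) :
    solve n m = 1 + solve n (m / 2) := by
  obtain ⟨m', rfl⟩ : ∃ m', m = 2 * m' := ⟨m / 2, by omega⟩
  rw [show 2 * m' / 2 = m' from by omega]
  have hloop := solveLoop_half n m' hn hm
  have hk0 : (0:Int) ≤ (solveLoop m' n 0).2 := solveLoop_k_le m' n 0
  rw [solve_val n (2 * m') (by omega), solve_val n m' (by omega), hloop]
  simp only
  by_cases heq : (solveLoop m' n 0).1 = m'
  · rw [if_pos (by omega : 2 * (solveLoop m' n 0).1 = 2 * m'), if_pos heq]; omega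
  · rw [if_neg (by omega : ¬ 2 * (solveLoop m' n 0).1 = 2 * m'), if_neg heq,
        show 2 * (solveLoop m' n 0).1 - 2 * m' = 2 * ((solveLoop m' n 0).1 - m') by ring,
        show ((solveLoop m' n 0).2 + 1).toNat = (solveLoop m' n 0).2.toNat + 1 by omega,
        Ssum_even]
    omega

-- A satisfies the odd-step recurrence of the backward greedy
theorem solve_odd (n m : Int) (hn : 1 ≤ n) (hm : n < m) (ho : m % 2 = 1) :
    solve n m = 1 + solve n (m + 1) := by
  have hunf : solveLoop (m + 1) n 0 = solveLoop (m + 1) (n * 2) (0 + 1) := by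
    rw [solveLoop, if_pos (by omega : n < m + 1), if_pos (by omega : (0:Int) < n)]
  have hloop : solveLoop m n 0 = solveLoop (m + 1) n 0 := by
    rw [solveLoop, if_pos hm, if_pos (by omega : (0:Int) < n)]
    rw [solveLoop_oddm m (n * 2) (0 + 1) ho (by omega) (by omega)]
    rw [hunf]
  have hknn : (0:Int) ≤ (solveLoop (m + 1) n 0).2 := solveLoop_k_le (m + 1) n 0
  have hteven : (solveLoop (m + 1) n 0).1 % 2 = 0 := by
    rw [hunf]; exact solveLoop_even (m + 1) (n * 2) (0 + 1) (by omega)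
  rw [solve_val n m (by omega), solve_val n (m + 1) (by omega), hloop]
  rw [if_neg (by omega : ¬ (solveLoop (m + 1) n 0).1 = m)]
  by_cases heq : (solveLoop (m + 1) n 0).1 = m + 1
  · rw [if_pos heq, heq, show m + 1 - m = 0 + 1 by ring,
        Ssum_succ_of_even _ 0 (by norm_num), Ssum_zero]
    omega
  · rw [if_neg heq,
        show (solveLoop (m + 1) n 0).1 - m = ((solveLoop (m + 1) n 0).1 - (m + 1)) + 1 by ring,
        Ssum_succ_of_even _ _ (by omega)]
    omega

-- the main induction: both programs follow the backward-greedy recursion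
theorem solve_eq_alt (n m : Int) (hpre : Pre_solve n m) : solve n m = solve_alt n m := by
  revert hpre
  fun_induction solve_alt n m with
  | case1 m h =>
    intro _
    rw [solve, if_pos h]
  | case2 m h h0 =>
    intro hpre
    rcases hpre with h' | h' <;> omega
  | case3 m h h0 he ih =>
    intro _
    have he' : m % 2 = 0 := by
      rw [PySem.Int.mod_eq_emod_of_pos (by norm_num : (0:Int) < 2)] at he; exact he
    have hdiv : PySem.Int.floordiv m 2 = m / 2 :=
      PySem.Int.floordiv_eq_ediv_of_pos (by norm_num)
    rw [hdiv] at ih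
    rw [solve_even n m (by omega) (by omega) he', ih (Or.inr (by omega)), hdiv]
  | case4 m h h0 he ih =>
    intro _
    have he' : m % 2 = 1 := by
      rw [PySem.Int.mod_eq_emod_of_pos (by norm_num : (0:Int) < 2)] at he; omega
    rw [solve_odd n m (by omega) (by omega) he', ih (Or.inr (by omega))]

-- ===== VERDICT (by name: the statement is the Claim_ definition above) =====
theorem solve_spec : Claim_equal_solve := by
  intro n m _hd hpre
  exact solve_eq_alt n m hpre
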